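-- pv_equiv track=rewrite | github.com/hamanpaul/dts-build | dtsbuild/generator.py | _render_memcfg_lines
-- ===== SOURCE A (Python) =====
-- def _render_memcfg_lines(memcfg_macro: str) -> list[str]:
--     macro = memcfg_macro.strip()
--     if not macro:
--         return ["        /* TODO: fill memcfg from DDR evidence */"]
--     tokens = [token.strip() for token in macro.split("|") if token.strip()]
--     if len(tokens) <= 1:
--         return [f"        memcfg = <({macro})>;"]
--     width = max(len(token) for token in tokens)
--     lines = [f"        memcfg = <({tokens[0].ljust(width)} | \\"]
--     for token in tokens[1:-1]:
--         lines.append(f"        {token.ljust(width)} | \\")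
--     lines.append(f"        {tokens[-1].ljust(width)} )>;")
--     return lines
-- ===== SOURCE B (Python) =====
-- def _render_memcfg_lines(memcfg_macro: str) -> list[str]:
--     macro = memcfg_macro.strip()
--     if not macro:
--         return ["        /* TODO: fill memcfg from DDR evidence */"]
--     tokens = [token.strip() for token in macro.split("|") if token.strip()]
--     if len(tokens) <= 1:
--         return [f"        memcfg = <({macro})>;"]
--     width = max(len(token) for token in tokens)
--     blob = ("        memcfg = <("
--             + " | \\\n        ".join(token.ljust(width) for token in tokens)
--             + " )>;")
--     return blob.split("\n")
-- ===== Notes on version B (the rewrite author's own statement) =====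
-- stated objective: alternative
-- what changed: The first/middle/last branching with a per-line append loop is replaced by building ONE string -- prefix, the padded tokens joined with a single bar-backslash-newline-indent separator, suffix -- and returning that string split on newlines, a join-then-split construction.
import Mathlib
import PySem

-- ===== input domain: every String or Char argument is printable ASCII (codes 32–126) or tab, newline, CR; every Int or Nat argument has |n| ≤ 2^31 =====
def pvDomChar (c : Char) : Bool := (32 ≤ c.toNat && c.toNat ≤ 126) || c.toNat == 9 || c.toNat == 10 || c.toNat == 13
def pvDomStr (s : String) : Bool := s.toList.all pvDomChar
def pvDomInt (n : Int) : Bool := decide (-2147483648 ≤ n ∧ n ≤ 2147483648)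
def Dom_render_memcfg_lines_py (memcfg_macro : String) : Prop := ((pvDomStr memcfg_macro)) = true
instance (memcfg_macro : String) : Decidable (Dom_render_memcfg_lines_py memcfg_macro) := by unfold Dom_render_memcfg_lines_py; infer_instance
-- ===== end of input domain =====

-- B replaces A's first/middle/last branching and per-line append loop by a join-then-split
-- construction: one string built with a bar-backslash-newline-indent separator, then split on newlines.

-- str.ljust(width): pad on the right with spaces (exact port of CPython's ljust on char lists)
def pvLjust (cs : List Char) (w : Nat) : List Char := cs ++ List.replicate (w - cs.length) ' '

-- ===== PORT A =====
def render_memcfg_lines_py (memcfg_macro : String) : List String :=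
  let mac := PySem.Chars.strip memcfg_macro.toList
  if mac = [] then ["        /* TODO: fill memcfg from DDR evidence */"]
  else
    let tokens := ((PySem.Chars.splitOn mac "|".toList).map PySem.Chars.strip).filter (· ≠ [])
    if tokens.length ≤ 1 then
      [String.mk ("        memcfg = <(".toList ++ mac ++ ")>;".toList)]
    else
      match tokens with
      | [] => []   -- unreachable: tokens.length ≥ 2 here
      | t0 :: rest =>
        let width := (rest.map List.length).foldl max t0.length   -- max(len(token) for token in tokens)
        let lines := [("        memcfg = <(".toList ++ pvLjust t0 width ++ " | \\".toList)]
        let lines := (PySem.List.slice (t0 :: rest) (some 1) (some (-1))).foldl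
          (fun ls tok => ls ++ [("        ".toList ++ pvLjust tok width ++ " | \\".toList)]) lines
        let lastTok := (PySem.List.pyGet? (t0 :: rest) (-1)).getD []
        (lines ++ [("        ".toList ++ pvLjust lastTok width ++ " )>;".toList)]).map String.mk

-- ===== PORT B =====
def render_memcfg_lines_py_alt (memcfg_macro : String) : List String :=
  let mac := PySem.Chars.strip memcfg_macro.toList
  if mac = [] then ["        /* TODO: fill memcfg from DDR evidence */"]
  else
    let tokens := ((PySem.Chars.splitOn mac "|".toList).map PySem.Chars.strip).filter (· ≠ [])
    if tokens.length ≤ 1 then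
      [String.mk ("        memcfg = <(".toList ++ mac ++ ")>;".toList)]
    else
      match tokens with
      | [] => []   -- unreachable: tokens.length ≥ 2 here (keeps width's max well-defined, as in Source B)
      | t0 :: rest =>
        let width := (rest.map List.length).foldl max t0.length   -- max(len(token) for token in tokens)
        let blob := "        memcfg = <(".toList
          ++ PySem.Chars.join " | \\\n        ".toList ((t0 :: rest).map (fun t => pvLjust t width))
          ++ " )>;".toList
        (PySem.Chars.splitOn blob "\n".toList).map String.mk

-- ===== PRECONDITION & SPEC =====
-- Pre_ excludes inputs where two or more pipe-separated fields survive and one of them still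
-- contains an interior newline after stripping: there A keeps the newline embedded inside one
-- returned entry while B yields separate list entries — neither rendering is specified for
-- such input, both are defensible.
def Pre_render_memcfg_lines_py (memcfg_macro : String) : Prop :=
  2 ≤ (((PySem.Chars.splitOn (PySem.Chars.strip memcfg_macro.toList) "|".toList).map
        PySem.Chars.strip).filter (· ≠ [])).length →
  ∀ t ∈ ((PySem.Chars.splitOn (PySem.Chars.strip memcfg_macro.toList) "|".toList).map
        PySem.Chars.strip).filter (· ≠ []), '\n' ∉ t
instance (memcfg_macro : String) : Decidable (Pre_render_memcfg_lines_py memcfg_macro) := by unfold Pre_render_memcfg_lines_py; infer_instance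
def pvWitness_render_memcfg_lines_py : String := "a | bb"
def Spec_render_memcfg_lines_py (memcfg_macro : String) (out : List String) : Prop := out = render_memcfg_lines_py_alt memcfg_macro
instance (memcfg_macro : String) (out : List String) : Decidable (Spec_render_memcfg_lines_py memcfg_macro out) := by unfold Spec_render_memcfg_lines_py; infer_instance

-- ===== CLAIM (what is proved, stated in full; the proofs are below) =====
def Claim_equal_render_memcfg_lines_py : Prop := ∀ (memcfg_macro : String), Dom_render_memcfg_lines_py memcfg_macro → Pre_render_memcfg_lines_py memcfg_macro → Spec_render_memcfg_lines_py memcfg_macro (render_memcfg_lines_py memcfg_macro)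

-- ===== LEMMAS AND PROOFS =====

-- go consumes a sep-free block into cur
lemma pv_go_consume (c : Char) :
    ∀ (p : List Char) (fuel : Nat) (t cur : List Char) (acc : List (List Char)),
      c ∉ p → p.length ≤ fuel →
      PySem.Chars.splitOn.go [c] fuel (p ++ t) cur acc
        = PySem.Chars.splitOn.go [c] (fuel - p.length) t (p.reverse ++ cur) acc := by
  intro p
  induction p with
  | nil => intro fuel t cur acc _ _; simp
  | cons x p ih =>
    intro fuel t cur acc hc hlen
    cases fuel with
    | zero => simp at hlen
    | succ fuel =>
      rw [List.cons_append, PySem.Chars.splitOn.go.eq_def]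
      simp only []
      have hne : ([c].isPrefixOf (x :: (p ++ t))) = false := by
        simp only [List.isPrefixOf, Bool.and_true]
        simp only [beq_eq_false_iff_ne, ne_eq]
        intro h; exact hc (by simp [h])
      rw [if_neg (by simp [hne])]
      have := ih fuel t (x :: cur) acc (fun h => hc (List.mem_cons_of_mem _ h))
        (by simpa using Nat.lt_succ_iff.mp (by simpa [Nat.succ_le_iff] using hlen))
      rw [this]
      simp only [List.length_cons, Nat.succ_sub_succ]
      congr 1
      simp

-- go at the separator
lemma pv_go_sep (c : Char) (fuel : Nat) (t cur : List Char) (acc : List (List Char)) :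
    PySem.Chars.splitOn.go [c] (fuel + 1) (c :: t) cur acc
      = PySem.Chars.splitOn.go [c] fuel t [] (cur.reverse :: acc) := by
  rw [PySem.Chars.splitOn.go.eq_def]
  simp [List.isPrefixOf]

-- go at the end of input
lemma pv_go_nil (c : Char) (fuel : Nat) (cur : List Char) (acc : List (List Char)) :
    PySem.Chars.splitOn.go [c] fuel [] cur acc = acc.reverse ++ [cur.reverse] := by
  cases fuel <;> rw [PySem.Chars.splitOn.go.eq_def] <;> simp

-- List.intercalate unfolding (no named Mathlib lemma in this version)
lemma pv_intercalate_cons_cons {α : Type} (s a b : List α) (t : List (List α)) :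
    List.intercalate s (a :: b :: t) = a ++ s ++ List.intercalate s (b :: t) := by
  simp [List.intercalate, List.intersperse]

lemma pv_intercalate_singleton {α : Type} (s a : List α) :
    List.intercalate s [a] = a := by
  simp [List.intercalate, List.intersperse]

-- splitOn inverts intercalate on sep-free parts
lemma pv_go_intercalate (c : Char) :
    ∀ (parts : List (List Char)) (p0 : List Char), (∀ p ∈ p0 :: parts, c ∉ p) →
    ∀ (fuel : Nat) (cur : List Char) (acc : List (List Char)),
      (List.intercalate [c] (p0 :: parts)).length ≤ fuel →
      PySem.Chars.splitOn.go [c] fuel (List.intercalate [c] (p0 :: parts)) cur acc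
        = acc.reverse ++ (cur.reverse ++ p0) :: parts := by
  intro parts
  induction parts with
  | nil =>
    intro p0 hfree fuel cur acc hfuel
    rw [pv_intercalate_singleton] at *
    rw [show p0 = p0 ++ [] by simp] at hfuel ⊢
    rw [pv_go_consume c p0 fuel [] cur acc (hfree p0 (by simp)) (by simpa using hfuel)]
    rw [pv_go_nil]
    simp
  | cons q parts ih =>
    intro p0 hfree fuel cur acc hfuel
    have hic : List.intercalate [c] (p0 :: q :: parts)
        = p0 ++ (c :: List.intercalate [c] (q :: parts)) := by
      rw [pv_intercalate_cons_cons]; simp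
    rw [hic] at hfuel ⊢
    have hlen : p0.length ≤ fuel := by
      simp only [List.length_append, List.length_cons] at hfuel; omega
    rw [pv_go_consume c p0 fuel _ cur acc (hfree p0 (by simp)) hlen]
    have hf2 : fuel - p0.length = (fuel - p0.length - 1) + 1 := by
      simp only [List.length_append, List.length_cons] at hfuel; omega
    rw [hf2, pv_go_sep]
    rw [ih q (fun p hp => hfree p (by simp at hp ⊢; tauto)) _ [] _
      (by simp only [List.length_append, List.length_cons] at hfuel; omega)]
    simp

lemma pv_splitOn_intercalate (c : Char) (p0 : List Char) (parts : List (List Char))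
    (hfree : ∀ p ∈ p0 :: parts, c ∉ p) :
    PySem.Chars.splitOn (List.intercalate [c] (p0 :: parts)) [c] = p0 :: parts := by
  unfold PySem.Chars.splitOn
  rw [pv_go_intercalate c parts p0 hfree _ [] [] (by omega)]
  simp

-- the blob is the '\n'-intercalation of A's lines (pure list algebra)
lemma pv_blob_tail (E T Z S : List Char) (hS : S = T ++ '\n' :: E) (y : List Char) :
    ∀ (l : List (List Char)) (x : List Char),
      List.intercalate S (x :: (l ++ [y])) ++ Z
        = (x ++ T) ++ '\n' :: List.intercalate ['\n'] (l.map (fun t => E ++ t ++ T) ++ [E ++ y ++ Z]) := by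
  intro l
  induction l with
  | nil =>
    intro x
    rw [show x :: ([] ++ [y]) = x :: [y] by simp, pv_intercalate_cons_cons]
    simp [pv_intercalate_singleton, hS]
  | cons a l ih =>
    intro x
    have h1 : List.intercalate S (x :: ((a :: l) ++ [y]))
        = x ++ S ++ List.intercalate S (a :: (l ++ [y])) := by
      rw [show x :: ((a :: l) ++ [y]) = x :: a :: (l ++ [y]) by simp, pv_intercalate_cons_cons]
    rw [h1, hS]
    have h2 : List.intercalate ['\n'] ((a :: l).map (fun t => E ++ t ++ T) ++ [E ++ y ++ Z])
        = (E ++ a ++ T) ++ '\n' :: List.intercalate ['\n'] (l.map (fun t => E ++ t ++ T) ++ [E ++ y ++ Z]) := by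
      cases l with
      | nil => rw [show ([a].map (fun t => E ++ t ++ T) ++ [E ++ y ++ Z]) = [E ++ a ++ T, E ++ y ++ Z] by simp,
          pv_intercalate_cons_cons]; simp [pv_intercalate_singleton]
      | cons b l => rw [show ((a :: b :: l).map (fun t => E ++ t ++ T) ++ [E ++ y ++ Z])
            = (E ++ a ++ T) :: ((b :: l).map (fun t => E ++ t ++ T) ++ [E ++ y ++ Z]) by simp,
          show (E ++ a ++ T) :: ((b :: l).map (fun t => E ++ t ++ T) ++ [E ++ y ++ Z])
            = (E ++ a ++ T) :: (E ++ b ++ T) :: (l.map (fun t => E ++ t ++ T) ++ [E ++ y ++ Z]) by simp,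
          pv_intercalate_cons_cons]; simp
    rw [h2]
    have := ih a
    simp only [List.append_assoc, hS] at this ⊢
    rw [← this]
    simp

lemma pv_slice_mid {α : Type} (t0 x : α) (l : List α) :
    PySem.List.slice (t0 :: (l ++ [x])) (some 1) (some (-1)) = l := by
  simp only [PySem.List.slice, PySem.List.clampIdx_neg_one]
  simp [PySem.List.clampIdx]

-- ===== VERDICT (by name: the statement is the Claim_ definition above) =====
theorem render_memcfg_lines_py_spec : Claim_equal_render_memcfg_lines_py := by
  intro m _ hpre
  unfold Spec_render_memcfg_lines_py render_memcfg_lines_py render_memcfg_lines_py_alt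
  by_cases h1 : PySem.Chars.strip m.toList = []
  · rw [if_pos h1, if_pos h1]
  · rw [if_neg h1, if_neg h1]
    set mac := PySem.Chars.strip m.toList with hmac
    set tokens := ((PySem.Chars.splitOn mac "|".toList).map PySem.Chars.strip).filter (· ≠ []) with htok
    by_cases h2 : tokens.length ≤ 1
    · rw [if_pos h2, if_pos h2]
    · rw [if_neg h2, if_neg h2]
      obtain ⟨t0, rest, ht⟩ : ∃ t0 rest, tokens = t0 :: rest := by
        cases h : tokens with
        | nil => rw [h] at h2; simp at h2
        | cons a b => exact ⟨a, b, rfl⟩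
      rcases List.eq_nil_or_concat rest with hr | ⟨l, x, hr⟩
      · rw [ht, hr] at h2; simp at h2
      · rw [ht, hr]
        simp only [List.concat_eq_append]
        refine congrArg (List.map String.mk) ?_
        -- no token contains '\n'
        have hfreeTok : ∀ t ∈ tokens, '\n' ∉ t := by
          have h2' : 2 ≤ tokens.length := by omega
          rw [htok, hmac] at h2' ⊢
          exact hpre h2'
        set width := (l ++ [x] |>.map List.length).foldl max t0.length with hw
        -- name the constant pieces
        set P : List Char := "        memcfg = <(".toList with hP
        set E : List Char := "        ".toList with hE
        set T : List Char := " | \\".toList with hT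
        set Z : List Char := " )>;".toList with hZ
        -- A's construction as an explicit list
        have hA : ((([(P ++ pvLjust t0 width ++ T)].append
              ((PySem.List.slice (t0 :: (l ++ [x])) (some 1) (some (-1))).foldl
                (fun ls tok => ls ++ [(E ++ pvLjust tok width ++ T)]) [(P ++ pvLjust t0 width ++ T)]))) = []) ∨ True := Or.inr trivial
        clear hA
        have hget : (PySem.List.pyGet? (t0 :: (l ++ [x])) (-1)).getD [] = x := by
          rw [show t0 :: (l ++ [x]) = (t0 :: l) ++ [x] by simp,
              PySem.List.pyGet?_neg_one_append_singleton]
          rfl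
        rw [pv_slice_mid, hget, PySem.List.foldl_append_singleton_eq_map]
        -- B's blob
        have hjoin : PySem.Chars.join " | \\\n        ".toList ((t0 :: (l ++ [x])).map (fun t => pvLjust t width))
            = List.intercalate (T ++ '\n' :: E) (pvLjust t0 width :: ((l.map (fun t => pvLjust t width)) ++ [pvLjust x width])) := by
          simp [PySem.Chars.join, hT, hE]
        rw [hjoin]
        have hblob := pv_blob_tail E T Z (T ++ '\n' :: E) rfl (pvLjust x width)
          (l.map (fun t => pvLjust t width)) (pvLjust t0 width)
        simp only [List.map_map] at hblob
        have hb : P ++ List.intercalate (T ++ '\n' :: E)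
              (pvLjust t0 width :: ((l.map (fun t => pvLjust t width)) ++ [pvLjust x width])) ++ Z
            = List.intercalate ['\n'] ((P ++ pvLjust t0 width ++ T)
                :: ((l.map (fun t => E ++ pvLjust t width ++ T)) ++ [E ++ pvLjust x width ++ Z])) := by
          rw [List.append_assoc, hblob]
          cases l with
          | nil =>
            rw [show ((P ++ pvLjust t0 width ++ T) :: (([] : List (List Char)).map (fun t => E ++ pvLjust t width ++ T) ++ [E ++ pvLjust x width ++ Z]))
                = [P ++ pvLjust t0 width ++ T, E ++ pvLjust x width ++ Z] by simp,
              pv_intercalate_cons_cons, pv_intercalate_singleton]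
            simp [pv_intercalate_singleton]
          | cons b bs =>
            rw [show ((P ++ pvLjust t0 width ++ T) :: ((b :: bs).map (fun t => E ++ pvLjust t width ++ T) ++ [E ++ pvLjust x width ++ Z]))
                = (P ++ pvLjust t0 width ++ T) :: (E ++ pvLjust b width ++ T) :: (bs.map (fun t => E ++ pvLjust t width ++ T) ++ [E ++ pvLjust x width ++ Z]) by simp,
              pv_intercalate_cons_cons]
            simp [Function.comp_def]
        -- '\n'-freeness of every line
        have hfreeLjust : ∀ t ∈ tokens, '\n' ∉ pvLjust t width := by
          intro t htmem hch
          rcases List.mem_append.mp hch with h | h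
          · exact hfreeTok t htmem h
          · exact absurd (List.eq_of_mem_replicate h) (by decide)
        have hfree : ∀ p ∈ (P ++ pvLjust t0 width ++ T)
            :: ((l.map (fun t => E ++ pvLjust t width ++ T)) ++ [E ++ pvLjust x width ++ Z]),
            '\n' ∉ p := by
          intro p hp hch
          have hcP : '\n' ∉ P := by rw [hP]; decide
          have hcE : '\n' ∉ E := by rw [hE]; decide
          have hcT : '\n' ∉ T := by rw [hT]; decide
          have hcZ : '\n' ∉ Z := by rw [hZ]; decide
          rcases List.mem_cons.mp hp with rfl | hp
          · rcases List.mem_append.mp hch with h | h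
            · rcases List.mem_append.mp h with h | h
              · exact hcP h
              · exact hfreeLjust t0 (by rw [ht, hr]; simp) h
            · exact hcT h
          rcases List.mem_append.mp hp with hp | hp
          · rcases List.mem_map.mp hp with ⟨t, htm, rfl⟩
            rcases List.mem_append.mp hch with h | h
            · rcases List.mem_append.mp h with h | h
              · exact hcE h
              · exact hfreeLjust t (by rw [ht, hr]; simp [htm]) h
            · exact hcT h
          · rcases List.mem_singleton.mp hp with rfl
            rcases List.mem_append.mp hch with h | h
            · rcases List.mem_append.mp h with h | h
              · exact hcE h
              · exact hfreeLjust x (by rw [ht, hr]; simp) h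
            · exact hcZ h
        rw [show "\n".toList = ['\n'] by rfl, hb, pv_splitOn_intercalate '\n' _ _ hfree]
        simp
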